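-- pv_equiv track=rewrite | github.com/dev-pipeline/dev-pipeline | lib/devpipeline/toolsupport.py | build_flex_args_keys
-- ===== SOURCE A (Python) =====
-- def build_flex_args_keys(components):
--     """
--     Helper function to build a list of options.
--
--     Some tools require require variations of the same options (e.g., cflags
--     for debug vs release builds), but manually creating those options is
--     cumbersome and error-prone.  This function handles that work by combining
--     all possible comintations of the values in components.
--
--     Arguments
--     components -- A list of lists that should be combined to form options.
--     """
--     def _prepend_first(components, sub_components):
--         ret = []
--         for first in components[0]:
--             for sub_component in sub_components:
--                 ret.append("{}.{}".format(first, sub_component))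
--         return ret
--
--     if len(components) > 1:
--         sub_components = build_flex_args_keys(components[1:])
--         return _prepend_first(components, sub_components)
--     elif len(components) == 1:
--         return components[0]
--     return []
-- ===== SOURCE B (Python) =====
-- def build_flex_args_keys(components):
--     if not components:
--         return []
--     acc = components[0]
--     for comp in components[1:]:
--         acc = ["{}.{}".format(a, c) for a in acc for c in comp]
--     return acc
-- ===== Notes on version B (the rewrite author's own statement) =====
-- stated objective: simpler
-- what changed: Replaces the recursive right-to-left construction (recurse on the tail, then prepend each first element in a helper) with a single iterative left fold that crosses an accumulator with each subsequent list.
import Mathlib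
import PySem

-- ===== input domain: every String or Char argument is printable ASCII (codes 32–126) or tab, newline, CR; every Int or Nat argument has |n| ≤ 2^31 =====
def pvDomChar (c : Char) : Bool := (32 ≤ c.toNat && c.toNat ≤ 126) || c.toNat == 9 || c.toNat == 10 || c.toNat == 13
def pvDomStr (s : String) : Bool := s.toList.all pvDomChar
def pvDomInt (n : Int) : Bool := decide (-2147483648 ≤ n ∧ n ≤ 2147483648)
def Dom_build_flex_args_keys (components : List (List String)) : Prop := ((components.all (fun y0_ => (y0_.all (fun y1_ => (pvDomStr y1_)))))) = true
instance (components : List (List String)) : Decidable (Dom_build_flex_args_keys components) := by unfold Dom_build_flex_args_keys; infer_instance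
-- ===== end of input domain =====

-- B replaces A's tail recursion + prepend helper with a single left fold; same cost (objective: simpler).

-- ===== PORT A =====
-- _prepend_first: nested loops appending "first.sub" for each pair
def prependFirst (first : List String) (sub : List String) : List String :=
  first.foldl (fun ret f => sub.foldl (fun r s => r ++ [f ++ "." ++ s]) ret) []

def build_flex_args_keys (components : List (List String)) : List String :=
  match components with
  | [] => []
  | [c] => c
  | c :: rest => prependFirst (c :: rest).headI (build_flex_args_keys rest)

-- ===== PORT B =====
def build_flex_args_keys_alt (components : List (List String)) : List String :=
  match components with
  | [] => []
  | c :: rest =>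
    rest.foldl (fun acc comp => acc.flatMap (fun a => comp.map (fun x => a ++ "." ++ x))) c

-- ===== PRECONDITION & SPEC =====
def Spec_build_flex_args_keys (components : List (List String)) (out : List String) : Prop := out = build_flex_args_keys_alt components
instance (components : List (List String)) (out : List String) : Decidable (Spec_build_flex_args_keys components out) := by unfold Spec_build_flex_args_keys; infer_instance

-- ===== CLAIM (what is proved, stated in full; the proofs are below) =====
def Claim_equal_build_flex_args_keys : Prop := ∀ (components : List (List String)), Dom_build_flex_args_keys components → Spec_build_flex_args_keys components (build_flex_args_keys components)

-- ===== LEMMAS AND PROOFS =====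

def cross (a b : List String) : List String := a.flatMap (fun x => b.map (fun y => x ++ "." ++ y))

theorem prependFirst_eq_cross (first sub : List String) : prependFirst first sub = cross first sub := by
  unfold prependFirst cross
  rw [show (fun ret f => sub.foldl (fun r s => r ++ [f ++ "." ++ s]) ret)
        = (fun ret f => ret ++ sub.map (fun s => f ++ "." ++ s)) from ?_,
      PySem.List.foldl_append_eq_flatMap]
  · simp
  · funext ret f
    exact PySem.List.foldl_append_singleton_eq_map ..

theorem cross_assoc (a b c : List String) : cross (cross a b) c = cross a (cross b c) := by
  unfold cross
  simp only [List.flatMap_assoc, List.map_flatMap, List.flatMap_map, List.map_map, Function.comp_def,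
    String.append_assoc]

theorem foldl_cross_cross (a : List String) (l : List (List String)) (b : List String) :
    l.foldl cross (cross a b) = cross a (l.foldl cross b) := by
  induction l generalizing b with
  | nil => rfl
  | cons d ds ih => simp only [List.foldl_cons, cross_assoc, ih]

theorem foldl_cross_eq (c : List String) (rest : List (List String)) :
    rest.foldl cross c = build_flex_args_keys (c :: rest) := by
  induction rest generalizing c with
  | nil => simp [build_flex_args_keys, List.foldl]
  | cons b rs ih =>
    rw [List.foldl_cons, ih (cross c b),
      show build_flex_args_keys (c :: b :: rs) = cross c (build_flex_args_keys (b :: rs)) from by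
        simp [build_flex_args_keys, prependFirst_eq_cross],
      ← ih b, ← foldl_cross_cross]
    rw [ih (cross c b)]

-- ===== VERDICT (by name: the statement is the Claim_ definition above) =====
theorem build_flex_args_keys_spec : Claim_equal_build_flex_args_keys := by
  intro components _
  unfold Spec_build_flex_args_keys
  cases components with
  | nil => rfl
  | cons c rest =>
    show build_flex_args_keys (c :: rest) = rest.foldl (fun acc comp => acc.flatMap fun a => comp.map fun x => a ++ "." ++ x) c
    rw [← foldl_cross_eq]
    rfl
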